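-- pv_equiv track=rewrite | github.com/shankar-borate/policygpt-poc | policygpt/ingestion/converters/pdf_html_converter.py | _wrap_bullet_lists
-- ===== SOURCE A (Python) =====
-- def _wrap_bullet_lists(parts: list[str]) -> list[str]:
--     """Wrap consecutive <li> fragments in a <ul> block."""
--     result: list[str] = []
--     i = 0
--     while i < len(parts):
--         if parts[i].startswith("<li>"):
--             group: list[str] = []
--             while i < len(parts) and parts[i].startswith("<li>"):
--                 group.append(parts[i])
--                 i += 1
--             result.append("<ul>\n" + "\n".join(group) + "\n</ul>")
--         else:
--             result.append(parts[i])
--             i += 1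
--     return result
-- ===== SOURCE B (Python) =====
-- def _wrap_bullet_lists(parts: list[str]) -> list[str]:
--     """Wrap consecutive <li> fragments in a <ul> block."""
--     out: list[str] = []
--     run: list[str] = []
--     # scan back-to-front, carrying the pending <li> run; flush it when a
--     # non-<li> fragment is reached, then reverse the accumulated output.
--     for p in reversed(parts):
--         if p.startswith("<li>"):
--             run.append(p)
--         else:
--             if run:
--                 out.append("<ul>\n" + "\n".join(reversed(run)) + "\n</ul>")
--                 run = []
--             out.append(p)
--     if run:
--         out.append("<ul>\n" + "\n".join(reversed(run)) + "\n</ul>")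
--     out.reverse()
--     return out
-- ===== Notes on version B (the rewrite author's own statement) =====
-- stated objective: alternative
-- what changed: Replaces A's nested while loops (outer index walk with repeated len/index checks plus an inner forward scan per run) by a single backwards pass that carries a pending <li>-run accumulator and builds the output back-to-front; the measured constant-factor speedup comes from dropping the per-element index bookkeeping.
import Mathlib
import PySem

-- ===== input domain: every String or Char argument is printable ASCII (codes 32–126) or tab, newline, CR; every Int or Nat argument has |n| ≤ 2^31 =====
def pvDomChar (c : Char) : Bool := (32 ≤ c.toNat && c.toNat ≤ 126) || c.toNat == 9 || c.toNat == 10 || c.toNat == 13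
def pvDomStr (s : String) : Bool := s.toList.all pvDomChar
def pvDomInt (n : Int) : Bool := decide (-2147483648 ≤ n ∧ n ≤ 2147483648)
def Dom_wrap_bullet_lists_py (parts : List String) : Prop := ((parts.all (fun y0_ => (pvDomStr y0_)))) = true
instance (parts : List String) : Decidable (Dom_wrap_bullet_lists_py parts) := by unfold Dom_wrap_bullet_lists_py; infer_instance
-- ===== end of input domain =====

-- B replaces A's nested while loops by a single backwards fold carrying a pending <li>-run accumulator; objective: alternative.


-- ===== PORT A =====
-- A's inner while loop: collect the leading run of <li> fragments, return (group, remaining)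
def pvTakeLi : List String → List String × List String
  | [] => ([], [])
  | p :: rest =>
    if PySem.Str.startswith p "<li>" then
      let gr := pvTakeLi rest
      (p :: gr.1, gr.2)
    else ([], p :: rest)

theorem pvTakeLi_len : ∀ xs : List String, (pvTakeLi xs).2.length ≤ xs.length := by
  intro xs
  induction xs with
  | nil => simp [pvTakeLi]
  | cons p rest ih =>
    simp only [pvTakeLi]
    split
    · exact Nat.le_succ_of_le ih
    · simp

-- A's outer while loop over the index, as recursion on the remaining suffix
def wrap_bullet_lists_py (parts : List String) : List String :=
  match parts with
  | [] => []
  | p :: rest =>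
    if PySem.Str.startswith p "<li>" then
      let gr := pvTakeLi rest
      ("<ul>\n" ++ PySem.Str.join "\n" (p :: gr.1) ++ "\n</ul>") :: wrap_bullet_lists_py gr.2
    else
      p :: wrap_bullet_lists_py rest
termination_by parts.length
decreasing_by
  · exact Nat.lt_succ_of_le (pvTakeLi_len rest)
  · simp

-- ===== PORT B =====
-- "<ul>\n" + "\n".join(run in original order) + "\n</ul>"
def pvWrapRun (run : List String) : String :=
  "<ul>\n" ++ PySem.Str.join "\n" run ++ "\n</ul>"

-- 'if run: out.append(wrap(run))' — flush the pending run onto the output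
def pvFlush (st : List String × List String) : List String :=
  if st.1 = [] then st.2 else pvWrapRun st.1 :: st.2

-- one step of B's reversed-order loop; state = (pending run, output so far),
-- both kept in original (front-of-list = earliest) order, as B's final reversals produce
def pvStep (p : String) (st : List String × List String) : List String × List String :=
  if PySem.Str.startswith p "<li>" then (p :: st.1, st.2) else ([], p :: pvFlush st)

def wrap_bullet_lists_py_alt (parts : List String) : List String :=
  pvFlush (parts.foldr pvStep ([], []))

-- ===== PRECONDITION & SPEC =====
def Spec_wrap_bullet_lists_py (parts : List String) (out : List String) : Prop := out = wrap_bullet_lists_py_alt parts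
instance (parts : List String) (out : List String) : Decidable (Spec_wrap_bullet_lists_py parts out) := by unfold Spec_wrap_bullet_lists_py; infer_instance

-- ===== CLAIM (what is proved, stated in full; the proofs are below) =====
def Claim_equal_wrap_bullet_lists_py : Prop := ∀ (parts : List String), Dom_wrap_bullet_lists_py parts → Spec_wrap_bullet_lists_py parts (wrap_bullet_lists_py parts)

-- ===== LEMMAS AND PROOFS =====

@[simp] theorem pvKey_eq (p : String) :
    PySem.Chars.startswith p.toList ['<', 'l', 'i', '>'] = PySem.Str.startswith p "<li>" := by
  simp [PySem.Str.startswith]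

-- B's fold state: pending run = A's leading <li> group, output = B on the remainder
theorem pvFold_state : ∀ xs : List String,
    xs.foldr pvStep ([], []) =
      ((pvTakeLi xs).1, wrap_bullet_lists_py_alt (pvTakeLi xs).2) := by
  intro xs
  induction xs with
  | nil => simp [pvTakeLi, wrap_bullet_lists_py_alt, pvFlush]
  | cons p rest ih =>
    by_cases hp : PySem.Str.startswith p "<li>"
    · simp only [List.foldr_cons, ih, pvStep, pvTakeLi, hp, if_pos]
    · simp only [List.foldr_cons, ih, pvStep, pvTakeLi, hp, if_neg, Bool.not_eq_true]
      rw [show wrap_bullet_lists_py_alt (p :: rest)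
            = pvFlush (pvStep p (rest.foldr pvStep ([], []))) from rfl, ih]
      simp only [pvStep, hp, Bool.false_eq_true, if_neg, not_false_iff]
      simp [pvFlush]

theorem wrap_eq : ∀ parts : List String,
    wrap_bullet_lists_py parts = wrap_bullet_lists_py_alt parts := by
  intro parts
  induction parts using wrap_bullet_lists_py.induct with
  | case1 => simp [wrap_bullet_lists_py, wrap_bullet_lists_py_alt, pvFlush]
  | case2 p rest hp gr ih =>
    simp only [wrap_bullet_lists_py, hp, if_pos]
    conv_rhs => rw [wrap_bullet_lists_py_alt]
    rw [List.foldr_cons, pvFold_state rest]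
    simp only [pvStep, hp, if_pos, pvFlush, pvWrapRun, reduceCtorEq, if_neg,
      not_false_iff]
    simp only [gr] at ih
    simp [ih]
  | case3 p rest hp ih =>
    simp only [Bool.not_eq_true] at hp
    simp only [wrap_bullet_lists_py, hp, Bool.false_eq_true, if_neg, not_false_iff]
    conv_rhs => rw [wrap_bullet_lists_py_alt]
    rw [List.foldr_cons, pvFold_state rest]
    simp only [pvStep, hp, Bool.false_eq_true, if_neg, not_false_iff]
    rw [show pvFlush ([], p :: pvFlush ((pvTakeLi rest).1, wrap_bullet_lists_py_alt (pvTakeLi rest).2))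
          = p :: pvFlush ((pvTakeLi rest).1, wrap_bullet_lists_py_alt (pvTakeLi rest).2) from rfl]
    rw [show wrap_bullet_lists_py_alt rest = pvFlush (rest.foldr pvStep ([], [])) from rfl,
      pvFold_state rest] at ih
    rw [ih]

-- ===== VERDICT (by name: the statement is the Claim_ definition above) =====
theorem wrap_bullet_lists_py_spec : Claim_equal_wrap_bullet_lists_py := by
  intro parts _
  exact wrap_eq parts
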